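-- pv_equiv track=rewrite | github.com/siapy/siapy-lib | _old/utils/utils.py | get_increasing_seq_indices
-- ===== SOURCE A (Python) =====
-- def get_increasing_seq_indices(values_list):
--     indices = []
--     last_value = 0
--     for idx, value in enumerate(values_list):
--         if value > last_value:
--             last_value = value
--             indices.append(idx)
--     return indices
-- ===== SOURCE B (Python) =====
-- def get_increasing_seq_indices(values_list):
--     prefixes = [0]
--     for v in values_list:
--         prefixes.append(max(prefixes[-1], v))
--     return [i for i, (p, v) in enumerate(zip(prefixes, values_list)) if v > p]
-- ===== Notes on version B (the rewrite author's own statement) =====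
-- stated objective: alternative
-- what changed: B first builds a prefix-running-max table (floored at 0) in one pass, then selects indices in a separate zip/enumerate comprehension, instead of A's fused scan that mutates last_value and appends inside one loop.
import Mathlib
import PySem

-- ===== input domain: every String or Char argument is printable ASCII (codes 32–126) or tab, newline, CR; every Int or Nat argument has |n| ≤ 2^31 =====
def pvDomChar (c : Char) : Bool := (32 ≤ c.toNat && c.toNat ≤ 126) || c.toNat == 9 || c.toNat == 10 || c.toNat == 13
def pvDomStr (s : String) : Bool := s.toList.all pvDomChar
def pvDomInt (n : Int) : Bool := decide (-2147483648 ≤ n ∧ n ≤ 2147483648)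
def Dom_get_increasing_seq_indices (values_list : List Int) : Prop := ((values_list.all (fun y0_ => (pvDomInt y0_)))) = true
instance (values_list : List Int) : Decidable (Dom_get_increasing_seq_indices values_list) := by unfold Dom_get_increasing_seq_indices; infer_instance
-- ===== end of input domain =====

-- B builds a prefix running-max table first, then selects indices in a separate pass (objective: alternative decomposition).
-- ===== PORT A =====
def get_increasing_seq_indices (values_list : List Int) : List Int :=
  (((PySem.List.enumerate values_list 0).foldl
      (fun (st : List Int × Int) p =>
        if p.2 > st.2 then (st.1 ++ [p.1], p.2) else st)
      ([], 0)).1)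

-- ===== PORT B =====
-- pvScan last vs : the successive values appended to `prefixes` by B's first loop
-- (prefixes[-1] is the previous running max, so prefixes = last :: pvScan last vs).
def pvScan (last : Int) : List Int → List Int
  | [] => []
  | v :: vs => max last v :: pvScan (max last v) vs

def get_increasing_seq_indices_alt (values_list : List Int) : List Int :=
  let prefixes : List Int := 0 :: pvScan 0 values_list
  (PySem.List.enumerate (prefixes.zip values_list) 0).filterMap
    (fun p => if p.2.2 > p.2.1 then some p.1 else none)

-- ===== PRECONDITION & SPEC =====
def Spec_get_increasing_seq_indices (values_list : List Int) (out : List Int) : Prop := out = get_increasing_seq_indices_alt values_list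
instance (values_list : List Int) (out : List Int) : Decidable (Spec_get_increasing_seq_indices values_list out) := by unfold Spec_get_increasing_seq_indices; infer_instance

-- ===== CLAIM (what is proved, stated in full; the proofs are below) =====
def Claim_equal_get_increasing_seq_indices : Prop := ∀ (values_list : List Int), Dom_get_increasing_seq_indices values_list → Spec_get_increasing_seq_indices values_list (get_increasing_seq_indices values_list)

-- ===== LEMMAS AND PROOFS =====

lemma pv_key : ∀ (vs : List Int) (s last : Int) (acc : List Int),
    (((PySem.List.enumerate vs s).foldl
        (fun (st : List Int × Int) p =>
          if p.2 > st.2 then (st.1 ++ [p.1], p.2) else st)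
        (acc, last)).1)
    = acc ++ (PySem.List.enumerate (((last :: pvScan last vs).zip vs)) s).filterMap
        (fun p => if p.2.2 > p.2.1 then some p.1 else none) := by
  intro vs
  induction vs with
  | nil => intro s last acc; simp [pvScan, PySem.List.enumerate_nil]
  | cons v vs ih =>
    intro s last acc
    by_cases h : v > last
    · have hm : max last v = v := by omega
      simp [pvScan, PySem.List.enumerate_cons, hm, h, ih, List.append_assoc]
    · have hm : max last v = last := by omega
      simp [pvScan, PySem.List.enumerate_cons, hm, h, ih]

-- ===== VERDICT (by name: the statement is the Claim_ definition above) =====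
theorem get_increasing_seq_indices_spec : Claim_equal_get_increasing_seq_indices := by
  intro vs _
  unfold Spec_get_increasing_seq_indices get_increasing_seq_indices get_increasing_seq_indices_alt
  simpa using pv_key vs 0 0 []
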